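-- pv_equiv track=rewrite | github.com/SZU-AdvTech-2023/308-Text-to-SQL-Empowered-by-Large-Language-Models-A-Benchmark-Evaluation | src/analyse_error_data.py | table_is_correct
-- ===== SOURCE A (Python) =====
-- def table_is_correct(p_toks, g_toks):
--     """
--     判断表是否正确
--     比较第一个from之后的表是否一致
--     :param p_sql:
--     :param g_sql:
--     :return: -1 表示没有from，即语法错误；0表示表不正确；1表示表正确
--     """
--     p_join_indexes = find_all_indices(p_toks,"join")
--     g_join_indexes = find_all_indices(g_toks,"join")
--     # 如果join关键字个数不一样则判定为联表不正确
--     if len(p_join_indexes) != len(g_join_indexes):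
--         return 0, "联表不正确"
--     p_tables = []
--     g_tables = []
--     p_from_index = p_toks.index("from")
--     p_tables.append({p_toks[p_from_index + 1]})
--     g_from_index = g_toks.index("from")
--     g_tables.append({g_toks[g_from_index + 1]})
--     if len(p_join_indexes) == 0:
--         if p_tables != g_tables:
--             return -1, "表不正确"
--         else:
--             return 1, None
--     for p_join_index in p_join_indexes:
--         if p_toks[p_join_index - 1] != "left" or p_toks[p_join_index - 1] != "right":
--             if type(p_tables[len(p_tables) - 1]) == set:
--                 p_tables[len(p_tables) - 1].add(p_toks[p_join_index + 1])
--             else: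
--                 p_tables.append({p_toks[p_join_index + 1]})
--         elif p_toks[p_join_index - 1] == "right":
--             p_tables.append(p_toks[p_join_index + 1])
--             p_tables[len(p_tables)-1], p_tables[len(p_tables)-2] = p_tables[len(p_tables)-2], p_tables[len(p_tables)-1]
--         else:
--             p_tables.append(p_toks[p_join_index + 1])
--     for g_join_index in g_join_indexes:
--         if g_toks[g_join_index - 1] != "left" or g_toks[g_join_index - 1] != "right":
--             if type(g_tables[len(g_tables) - 1]) == set:
--                 g_tables[len(g_tables) - 1].add(g_toks[g_join_index + 1])
--             else:
--                 g_tables.append({g_toks[g_join_index + 1]})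
--         elif g_toks[g_join_index - 1] == "right":
--             g_tables.append(g_toks[g_join_index + 1])
--             g_tables[len(g_tables)-1], g_tables[len(g_tables)-2] = g_tables[len(g_tables)-2], g_tables[len(g_tables)-1]
--         else:
--             g_tables.append(g_toks[g_join_index + 1])
--     if p_tables[0] == g_tables[0]:
--         return 1, None
--     else:
--         if type(p_tables[0]) == set and type(g_tables[0]) == set and p_toks[p_from_index + 1] == g_toks[g_from_index + 1]:
--             return 0, "联表不正确"
--         else:
--             return -1, "表不正确"
--
-- def find_all_indices(text, char_to_find):
--     indices = []
--     # 使用循环查找字符的所有索引位置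
--     for i, char in enumerate(text):
--         if char == char_to_find:
--             indices.append(i)
--     return indices
-- ===== SOURCE B (Python) =====
-- def table_is_correct(p_toks, g_toks):
--     # Streaming rewrite: join successors are collected by one forward flag pass
--     # (no index lists, no set objects during the scan) and the table collections
--     # are compared as canonical sorted deduplicated lists.
--     if p_toks.count("join") != g_toks.count("join"):
--         return 0, "联表不正确"
--     p_first = p_toks[p_toks.index("from") + 1]
--     g_first = g_toks[g_toks.index("from") + 1]
--     if _tables(p_toks, p_first) == _tables(g_toks, g_first):
--         return 1, None
--     if p_first == g_first:
--         return 0, "联表不正确"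
--     return -1, "表不正确"
--
--
-- def _tables(toks, first):
--     """Canonical form of the joined tables: sorted deduplication of the from-table
--     plus every join successor, collected by a streaming flag pass."""
--     tables = [first]
--     grab = False
--     for tok in toks:
--         if grab:
--             tables.append(tok)
--         grab = tok == "join"
--     return sorted(set(tables))
-- ===== Notes on version B (the rewrite author's own statement) =====
-- stated objective: alternative
-- what changed: A builds a join-index list (find_all_indices) and mutates a list of set objects through dead left/right branches before an extensional set comparison; B collects the join successors in one streaming flag pass (no index lists, no set objects during the scan) and compares the table collections as canonical sorted deduplicated lists.
import Mathlib
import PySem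

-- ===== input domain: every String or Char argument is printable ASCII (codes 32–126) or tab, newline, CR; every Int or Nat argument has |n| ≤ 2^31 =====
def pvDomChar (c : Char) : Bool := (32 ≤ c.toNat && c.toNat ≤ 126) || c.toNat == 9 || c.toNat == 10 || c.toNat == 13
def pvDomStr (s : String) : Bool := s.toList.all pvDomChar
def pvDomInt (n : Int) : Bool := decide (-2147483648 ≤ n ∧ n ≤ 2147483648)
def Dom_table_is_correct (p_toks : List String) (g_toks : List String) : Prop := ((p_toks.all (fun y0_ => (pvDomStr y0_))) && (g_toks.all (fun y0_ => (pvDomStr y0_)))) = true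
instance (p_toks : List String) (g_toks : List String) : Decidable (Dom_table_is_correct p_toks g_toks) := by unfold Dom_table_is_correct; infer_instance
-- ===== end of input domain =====

-- B replaces A's index-pass / list-of-sets bookkeeping with one streaming
-- state-machine pass per token list plus a sorted-deduplicated-list comparison
-- (objective: alternative); return values agree on every input where the
-- Python A returns (Pre_ excludes exactly A's raising inputs).


-- ===== PORT A =====
def pvFindAllIndices (text : List String) (c : String) : List Int :=
  (PySem.List.enumerate text).foldl
    (fun acc e => if e.2 = c then acc ++ [e.1] else acc) []

inductive PvElem where
  | set : PySem.Set String → PvElem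
  | str : String → PvElem
deriving DecidableEq, Repr

def pvElemEq : PvElem → PvElem → Bool
  | .set s, .set t => PySem.Set.equal s t
  | .str a, .str b => a == b
  | _, _ => false

def pvIsSet : PvElem → Bool
  | .set _ => true
  | .str _ => false

def pvTablesEq (xs ys : List PvElem) : Bool :=
  xs.length == ys.length && (xs.zip ys).all fun e => pvElemEq e.1 e.2

def pvJoinStep (toks : List String) (tables : List PvElem) (j : Int) : List PvElem :=
  let prev := PySem.List.pyGetD toks (j - 1) ""
  let nxt := PySem.List.pyGetD toks (j + 1) ""
  if prev ≠ "left" ∨ prev ≠ "right" then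
    match PySem.List.pyGetD tables (PySem.List.len tables - 1) (.str "") with
    | .set s => PySem.List.pySetD tables (PySem.List.len tables - 1) (.set (PySem.Set.add s nxt))
    | .str _ => tables ++ [.set (PySem.Set.ofList [nxt])]
  else if prev = "right" then
    let t := tables ++ [.str nxt]
    let last := PySem.List.pyGetD t (PySem.List.len t - 1) (.str "")
    let prevLast := PySem.List.pyGetD t (PySem.List.len t - 2) (.str "")
    PySem.List.pySetD (PySem.List.pySetD t (PySem.List.len t - 1) prevLast) (PySem.List.len t - 2) last
  else
    tables ++ [.str nxt]

def table_is_correct (p_toks : List String) (g_toks : List String) : Int × Option String :=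
  let p_join_indexes := pvFindAllIndices p_toks "join"
  let g_join_indexes := pvFindAllIndices g_toks "join"
  if p_join_indexes.length ≠ g_join_indexes.length then (0, some "联表不正确")
  else
    let p_from_index : Nat := (PySem.List.index? p_toks "from").getD 0
    let p_tables : List PvElem := [.set (PySem.Set.ofList [PySem.List.pyGetD p_toks ((p_from_index : Int) + 1) ""])]
    let g_from_index : Nat := (PySem.List.index? g_toks "from").getD 0
    let g_tables : List PvElem := [.set (PySem.Set.ofList [PySem.List.pyGetD g_toks ((g_from_index : Int) + 1) ""])]
    if p_join_indexes.length = 0 then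
      if ¬ (pvTablesEq p_tables g_tables = true) then (-1, some "表不正确") else (1, none)
    else
      let p_tables := p_join_indexes.foldl (pvJoinStep p_toks) p_tables
      let g_tables := g_join_indexes.foldl (pvJoinStep g_toks) g_tables
      let p0 := PySem.List.pyGetD p_tables 0 (.str "")
      let g0 := PySem.List.pyGetD g_tables 0 (.str "")
      if pvElemEq p0 g0 then (1, none)
      else
        if pvIsSet p0 ∧ pvIsSet g0 ∧
            PySem.List.pyGetD p_toks ((p_from_index : Int) + 1) "" = PySem.List.pyGetD g_toks ((g_from_index : Int) + 1) "" then
          (0, some "联表不正确")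
        else (-1, some "表不正确")

-- ===== PORT B =====
-- one step of _tables' loop body: state = (tables, grab)
def pvTabsStep (st : List String × Bool) (tok : String) : List String × Bool :=
  (if st.2 then st.1 ++ [tok] else st.1, tok == "join")

def pvTabs (toks : List String) (first : String) : List String :=
  PySem.List.sorted (PySem.Set.ofList (toks.foldl pvTabsStep ([first], false)).1)
    (fun x => x) false

-- pyGetD "" totalizes p_toks[p_toks.index("from") + 1] (outside Pre_ the Python raises)
def table_is_correct_alt (p_toks : List String) (g_toks : List String) : Int × Option String :=
  if PySem.List.count p_toks "join" ≠ PySem.List.count g_toks "join" then (0, some "联表不正确")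
  else
    let p_first := PySem.List.pyGetD p_toks ((((PySem.List.index? p_toks "from").getD 0 : Nat) : Int) + 1) ""
    let g_first := PySem.List.pyGetD g_toks ((((PySem.List.index? g_toks "from").getD 0 : Nat) : Int) + 1) ""
    if pvTabs p_toks p_first = pvTabs g_toks g_first then (1, none)
    else if p_first = g_first then (0, some "联表不正确")
    else (-1, some "表不正确")

-- ===== PRECONDITION & SPEC =====
-- Pre_ excludes exactly the inputs on which the Python A raises: when the join
-- counts agree, A raises ValueError unless "from" occurs before the last token of
-- each list (its successor token is read), and IndexError when a list ends in "join".
def Pre_table_is_correct (p_toks : List String) (g_toks : List String) : Prop :=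
  p_toks.count "join" = g_toks.count "join" →
    ("from" ∈ p_toks.dropLast ∧ "from" ∈ g_toks.dropLast ∧
     p_toks.getLast? ≠ some "join" ∧ g_toks.getLast? ≠ some "join")
instance (p_toks : List String) (g_toks : List String) : Decidable (Pre_table_is_correct p_toks g_toks) := by unfold Pre_table_is_correct; infer_instance

def pvWitness_table_is_correct : List String × List String :=
  (["select", "*", "from", "t1", "join", "t2", "x"], ["select", "*", "from", "t2", "join", "t1", "y"])

def Spec_table_is_correct (p_toks : List String) (g_toks : List String) (out : Int × Option String) : Prop := out = table_is_correct_alt p_toks g_toks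
instance (p_toks : List String) (g_toks : List String) (out : Int × Option String) : Decidable (Spec_table_is_correct p_toks g_toks out) := by unfold Spec_table_is_correct; infer_instance

-- ===== CLAIM (what is proved, stated in full; the proofs are below) =====
def Claim_equal_table_is_correct : Prop := ∀ (p_toks : List String) (g_toks : List String), Dom_table_is_correct p_toks g_toks → Pre_table_is_correct p_toks g_toks → Spec_table_is_correct p_toks g_toks (table_is_correct p_toks g_toks)

-- ===== LEMMAS AND PROOFS =====

theorem pvFindAll_eq (t : List String) (c : String) :
    pvFindAllIndices t c
      = ((PySem.List.enumerate t).filter (fun e => e.2 == c)).map Prod.fst := by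
  unfold pvFindAllIndices
  have h : (fun (acc : List Int) (e : Int × String) => if e.2 = c then acc ++ [e.1] else acc)
      = (fun acc e => if (fun (x : Int × String) => x.2 == c) e = true then acc ++ [(fun (x : Int × String) => x.1) e] else acc) := by
    funext acc e; by_cases h : e.2 = c <;> simp [h]
  rw [h, PySem.List.foldl_append_if]
  simp

theorem pvFindAll_len (t : List String) (c : String) :
    (pvFindAllIndices t c).length = PySem.List.count t c := by
  rw [pvFindAll_eq, List.length_map, PySem.List.count_eq, List.count_eq_countP]
  conv_rhs => rw [← PySem.List.map_snd_enumerate t 0, List.countP_map]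
  rw [← List.countP_eq_length_filter]
  rfl

theorem pvJoinStep_single (toks : List String) (s : PySem.Set String) (j : Int) :
    pvJoinStep toks [PvElem.set s] j
      = [PvElem.set (s.add (PySem.List.pyGetD toks (j + 1) ""))] := by
  unfold pvJoinStep
  rw [if_pos]
  · norm_num [PySem.List.len, PySem.List.pyGetD_zero_cons, PySem.List.pySetD_of_nonneg]
  · by_cases h : PySem.List.pyGetD toks (j - 1) "" = "left"
    · exact Or.inr (by simp [h])
    · exact Or.inl h

theorem pvFold_joinStep (toks : List String) (js : List Int) (s0 : PySem.Set String) :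
    js.foldl (pvJoinStep toks) [PvElem.set s0]
      = [PvElem.set (js.foldl (fun s j => s.add (PySem.List.pyGetD toks (j + 1) "")) s0)] := by
  induction js generalizing s0 with
  | nil => rfl
  | cons j js ih => simp only [List.foldl_cons, pvJoinStep_single, ih]

-- structural characterisation of B's join-successor collection
def pvJs : List String → List String
  | [] => []
  | t :: rest => (if t == "join" then rest.take 1 else []) ++ pvJs rest

theorem pvJs_of_not_mem (toks : List String) (h : "join" ∉ toks) : pvJs toks = [] := by
  induction toks with
  | nil => rfl
  | cons t rest ih =>
    simp only [List.mem_cons, not_or] at h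
    simp [pvJs, Ne.symm h.1, ih h.2]

theorem pvMemTakeOne (l : List String) (y : String) :
    y ∈ l.take 1 ↔ ∃ _ : 0 < l.length, y = l[0] := by
  cases l <;> simp

theorem mem_pvJs (toks : List String) (y : String) :
    y ∈ pvJs toks ↔ ∃ k, ∃ h : k + 1 < toks.length, toks[k] = "join" ∧ y = toks[k + 1] := by
  induction toks with
  | nil => simp [pvJs]
  | cons t rest ih =>
    simp only [pvJs, List.mem_append, ih]
    constructor
    · rintro (h | ⟨k, hk, hj, hy⟩)
      · by_cases ht : t == "join"
        · rw [if_pos ht] at h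
          rcases (pvMemTakeOne rest y).mp h with ⟨hlt, rfl⟩
          exact ⟨0, by simpa using hlt, by simpa using ht, by simp⟩
        · simp [ht] at h
      · exact ⟨k + 1, by simpa using hk, by simpa using hj, by simpa using hy⟩
    · rintro ⟨k, hk, hj, hy⟩
      cases k with
      | zero =>
        left
        have ht : (t == "join") = true := by simpa using hj
        rw [if_pos ht]
        exact (pvMemTakeOne rest y).mpr ⟨by simp at hk ⊢; omega, by simpa using hy⟩
      | succ k =>
        right
        exact ⟨k, by simpa using hk, by simpa using hj, by simpa using hy⟩

-- the _tables fold collects the join successors after the initial tables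
theorem pvTabs_fold (toks : List String) (acc : List String) (gj : Bool) :
    (toks.foldl pvTabsStep (acc, gj)).1
      = acc ++ (if gj then toks.take 1 else []) ++ pvJs toks := by
  induction toks generalizing acc gj with
  | nil => simp [pvJs]
  | cons t rest ih =>
    simp only [List.foldl_cons, pvTabsStep, pvJs, ih]
    cases gj <;> simp [List.append_assoc]

theorem pvTabs_eq (toks : List String) (first : String) :
    pvTabs toks first
      = PySem.List.sorted (PySem.Set.ofList (first :: pvJs toks)) (fun x => x) false := by
  unfold pvTabs
  rw [pvTabs_fold]
  simp

-- sorted deduplicated lists are equal iff the underlying lists have the same members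
theorem pvSorted_ofList_eq_iff (xs ys : List String) :
    (PySem.List.sorted (PySem.Set.ofList xs) (fun x => x) false
       = PySem.List.sorted (PySem.Set.ofList ys) (fun x => x) false)
      ↔ ∀ y, y ∈ xs ↔ y ∈ ys := by
  rw [PySem.List.sorted_id_eq_sorted_id_iff_perm,
    List.perm_ext_iff_of_nodup (PySem.Set.nodup_ofList xs) (PySem.Set.nodup_ofList ys)]
  constructor <;> intro h y
  · rw [← PySem.Set.mem_ofList (xs := xs), ← PySem.Set.mem_ofList (xs := ys)]; exact h y
  · rw [PySem.Set.mem_ofList, PySem.Set.mem_ofList]; exact h y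

-- A's accumulated set over the join indices has the members B's scan collects
theorem pvMemA (toks : List String) (a y : String) (hlast : toks.getLast? ≠ some "join") :
    (y ∈ (pvFindAllIndices toks "join").foldl
        (fun s j => s.add (PySem.List.pyGetD toks (j + 1) "")) (PySem.Set.ofList [a]))
      ↔ (y = a ∨ y ∈ pvJs toks) := by
  rw [PySem.Set.mem_foldl_add, mem_pvJs]
  simp only [PySem.Set.mem_ofList, List.mem_singleton]
  have hidx : ∀ k (hk : k < toks.length), toks[k] = "join" → k + 1 < toks.length := by
    intro k hk hj
    by_contra hge
    have hk1 : k = toks.length - 1 := by omega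
    apply hlast
    rw [List.getLast?_eq_getElem?]
    subst hk1
    simp [List.getElem?_eq_getElem hk, hj]
  constructor
  · rintro (h | ⟨j, hj, rfl⟩)
    · exact Or.inl h
    · right
      rw [pvFindAll_eq] at hj
      rcases List.mem_map.mp hj with ⟨e, he, rfl⟩
      rcases List.mem_filter.mp he with ⟨hmem, hc⟩
      rcases (PySem.List.mem_enumerate_iff toks 0 e).mp hmem with ⟨k, hk, rfl⟩
      have hj' : toks[k] = "join" := by simpa using hc
      have hk1 : k + 1 < toks.length := hidx k hk hj'
      refine ⟨k, hk1, hj', ?_⟩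
      have : ((0 + (k : Int)) + 1) = (((k + 1 : Nat) : Int)) := by push_cast; ring
      rw [this, PySem.List.pyGetD_natCast, List.getD_eq_getElem _ _ hk1]
  · rintro (h | ⟨k, hk1, hj, rfl⟩)
    · exact Or.inl h
    · right
      refine ⟨(0 : Int) + (k : Int), ?_, ?_⟩
      · rw [pvFindAll_eq]
        refine List.mem_map.mpr ⟨((0 : Int) + (k : Int), toks[k]), List.mem_filter.mpr ⟨?_, by simpa using hj⟩, rfl⟩
        exact (PySem.List.mem_enumerate_iff toks 0 _).mpr ⟨k, by omega, rfl⟩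
      · have : (((0 : Int) + (k : Int)) + 1) = (((k + 1 : Nat) : Int)) := by push_cast; ring
        rw [this, PySem.List.pyGetD_natCast, List.getD_eq_getElem _ _ hk1]

theorem table_is_correct_eq (p g : List String) (hpre : Pre_table_is_correct p g) :
    table_is_correct p g = table_is_correct_alt p g := by
  unfold table_is_correct table_is_correct_alt
  simp only [pvFindAll_len, PySem.List.count_eq]
  by_cases hne : List.count "join" p = List.count "join" g
  case neg => simp [hne]
  obtain ⟨hfp, hfg, hlp, hlg⟩ := hpre (by simpa [List.count_eq_countP] using hne)
  simp only [hne, if_pos, ite_not]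
  set a := PySem.List.pyGetD p ((((PySem.List.index? p "from").getD 0 : Nat) : Int) + 1) "" with ha
  set b := PySem.List.pyGetD g ((((PySem.List.index? g "from").getD 0 : Nat) : Int) + 1) "" with hb
  rw [pvTabs_eq, pvTabs_eq]
  have hmain : (PySem.List.sorted (PySem.Set.ofList (a :: pvJs p)) (fun x => x) false
        = PySem.List.sorted (PySem.Set.ofList (b :: pvJs g)) (fun x => x) false)
      ↔ (PySem.Set.equal
          ((pvFindAllIndices p "join").foldl (fun s j => s.add (PySem.List.pyGetD p (j + 1) "")) (PySem.Set.ofList [a]))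
          ((pvFindAllIndices g "join").foldl (fun s j => s.add (PySem.List.pyGetD g (j + 1) "")) (PySem.Set.ofList [b])) = true) := by
    rw [pvSorted_ofList_eq_iff, PySem.Set.equal_iff]
    constructor <;> intro h y
    · rw [pvMemA p a y hlp, pvMemA g b y hlg]
      simpa using h y
    · have := h y
      rw [pvMemA p a y hlp, pvMemA g b y hlg] at this
      simpa using this
  by_cases h0 : List.count "join" g = 0
  · -- no "join" token on either side
    have h0p : List.count "join" p = 0 := hne.trans h0
    have hnp : "join" ∉ p := List.count_eq_zero.mp h0p
    have hng : "join" ∉ g := List.count_eq_zero.mp h0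
    rw [if_pos h0, pvJs_of_not_mem p hnp, pvJs_of_not_mem g hng]
    by_cases hab : a = b
    · have h1 : pvTablesEq [PvElem.set (PySem.Set.ofList [a])] [PvElem.set (PySem.Set.ofList [b])] = true := by
        simp [pvTablesEq, pvElemEq, hab, PySem.Set.equal_iff]
      rw [hab] at h1
      simp [h1, hab]
    · have hs : PySem.Set.equal (PySem.Set.ofList [a]) (PySem.Set.ofList [b]) = false := by
        apply Bool.eq_false_iff.mpr
        intro h
        have := (PySem.Set.equal_iff _ _).mp h a
        simp [PySem.Set.mem_ofList] at this
        exact hab this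
      have h1 : pvTablesEq [PvElem.set (PySem.Set.ofList [a])] [PvElem.set (PySem.Set.ofList [b])] = false := by
        simp [pvTablesEq, pvElemEq, hs]
      have hsort : ¬ (PySem.List.sorted (PySem.Set.ofList [a]) (fun x => x) false
          = PySem.List.sorted (PySem.Set.ofList [b]) (fun x => x) false) := by
        rw [pvSorted_ofList_eq_iff]
        intro h
        exact hab (by simpa using (h a).mp (by simp))
      simp [h1, hab, hsort]
  · -- at least one join
    rw [if_neg h0, pvFold_joinStep, pvFold_joinStep]
    simp only [PySem.List.pyGetD_zero_cons, pvElemEq, pvIsSet, true_and]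
    by_cases heq : PySem.List.sorted (PySem.Set.ofList (a :: pvJs p)) (fun x => x) false
        = PySem.List.sorted (PySem.Set.ofList (b :: pvJs g)) (fun x => x) false
    · rw [if_pos heq, if_pos (hmain.mp heq)]
    · rw [if_neg heq, if_neg (fun h => heq (hmain.mpr h))]

-- ===== VERDICT (by name: the statement is the Claim_ definition above) =====
theorem table_is_correct_spec : Claim_equal_table_is_correct := by
  intro p_toks g_toks _ hpre
  unfold Spec_table_is_correct
  exact table_is_correct_eq p_toks g_toks hpre
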